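-- pv_equiv track=rewrite | github.com/reahl/swordfish | src/reahl/swordfish/gemstone/browser.py | source_code_character_map
-- ===== SOURCE A (Python) =====
-- def source_code_character_map(source):
--     code_character_map = [True for _ in source]
--     index = 0
--     state = 'code'
--     while index < len(source):
--         character = source[index]
--         if state == 'code':
--             if character == "'":
--                 code_character_map[index] = False
--                 state = 'string'
--             elif character == '"':
--                 code_character_map[index] = False
--                 state = 'comment'
--         elif state == 'string':
--             code_character_map[index] = False
--             if character == "'":
--                 has_escaped_quote = (
--                     index + 1 < len(source)
--                     and source[index + 1] == "'"
--                 )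
--                 if has_escaped_quote:
--                     code_character_map[index + 1] = False
--                     index = index + 1
--                 else:
--                     state = 'code'
--         elif state == 'comment':
--             code_character_map[index] = False
--             if character == '"':
--                 state = 'code'
--         index = index + 1
--     return code_character_map
-- ===== SOURCE B (Python) =====
-- def source_code_character_map(source):
--     n = len(source)
--     result = []
--     i = 0
--     while i < n:
--         c = source[i]
--         if c == "'":
--             result.append(False)
--             i += 1
--             while i < n:
--                 result.append(False)
--                 if source[i] == "'":
--                     if i + 1 < n and source[i + 1] == "'":
--                         result.append(False)
--                         i += 2
--                     else:
--                         i += 1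
--                         break
--                 else:
--                     i += 1
--         elif c == '"':
--             result.append(False)
--             i += 1
--             while i < n:
--                 result.append(False)
--                 i += 1
--                 if source[i - 1] == '"':
--                     break
--         else:
--             result.append(True)
--             i += 1
--     return result
-- ===== Notes on version B (the rewrite author's own statement) =====
-- stated objective: simpler
-- what changed: Replaces the explicit state variable and preallocated mutated list with stateless nested scanning loops that append marks as they consume each code/string/comment region.
import Mathlib
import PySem

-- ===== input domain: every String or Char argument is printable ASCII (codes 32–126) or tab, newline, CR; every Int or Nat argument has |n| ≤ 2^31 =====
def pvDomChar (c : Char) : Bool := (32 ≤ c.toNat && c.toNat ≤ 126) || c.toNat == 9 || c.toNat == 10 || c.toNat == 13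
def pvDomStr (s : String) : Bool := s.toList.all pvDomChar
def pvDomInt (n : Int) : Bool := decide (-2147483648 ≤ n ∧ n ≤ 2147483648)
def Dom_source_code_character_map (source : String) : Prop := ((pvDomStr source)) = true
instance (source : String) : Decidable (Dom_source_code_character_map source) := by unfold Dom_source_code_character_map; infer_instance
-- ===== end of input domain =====

-- B replaces A's explicit state variable and preallocated mutated list with stateless
-- nested scanning loops that append marks as they consume each region (objective: simpler).
-- Both while-loops are ported with an explicit fuel counter (= the string length, an upper
-- bound on the remaining iterations) that only makes the recursion structural; it never fires.


-- ===== PORT A =====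
-- literal transliteration of A's single while-loop with the `state` variable and the
-- in-place-mutated `code_character_map`
def aLoop (src : List Char) (m : List Bool) (index : Nat) (state : String) : Nat → List Bool
  | 0 => m
  | fuel + 1 =>
    if h : index < src.length then
      let character := src[index]
      if state = "code" then
        if character = '\'' then
          aLoop src (m.set index false) (index + 1) "string" fuel
        else if character = '"' then
          aLoop src (m.set index false) (index + 1) "comment" fuel
        else
          aLoop src m (index + 1) state fuel
      else if state = "string" then
        let m1 := m.set index false
        if character = '\'' then
          if hq : index + 1 < src.length then
            if src[index + 1] = '\'' then
              aLoop src (m1.set (index + 1) false) (index + 2) "string" fuel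
            else
              aLoop src m1 (index + 1) "code" fuel
          else
            aLoop src m1 (index + 1) "code" fuel
        else
          aLoop src m1 (index + 1) "string" fuel
      else if state = "comment" then
        let m1 := m.set index false
        if character = '"' then
          aLoop src m1 (index + 1) "code" fuel
        else
          aLoop src m1 (index + 1) "comment" fuel
      else
        aLoop src m (index + 1) state fuel
    else m

def source_code_character_map (source : String) : List Bool :=
  aLoop source.toList (source.toList.map (fun _ => true)) 0 "code" source.toList.length

-- ===== PORT B =====
-- B's outer loop over code characters and the two inner region loops
mutual
def bOuter (src : List Char) (i : Nat) : Nat → List Bool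
  | 0 => []
  | fuel + 1 =>
    if h : i < src.length then
      let c := src[i]
      if c = '\'' then false :: bStr src (i + 1) fuel
      else if c = '"' then false :: bCom src (i + 1) fuel
      else true :: bOuter src (i + 1) fuel
    else []
def bStr (src : List Char) (i : Nat) : Nat → List Bool
  | 0 => []
  | fuel + 1 =>
    if h : i < src.length then
      if src[i] = '\'' then
        if h2 : i + 1 < src.length then
          if src[i + 1] = '\'' then false :: false :: bStr src (i + 2) fuel
          else false :: bOuter src (i + 1) fuel
        else false :: bOuter src (i + 1) fuel
      else false :: bStr src (i + 1) fuel
    else []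
def bCom (src : List Char) (i : Nat) : Nat → List Bool
  | 0 => []
  | fuel + 1 =>
    if h : i < src.length then
      if src[i] = '"' then false :: bOuter src (i + 1) fuel
      else false :: bCom src (i + 1) fuel
    else []
end

def source_code_character_map_alt (source : String) : List Bool :=
  bOuter source.toList 0 source.toList.length

-- ===== PRECONDITION & SPEC =====
def Spec_source_code_character_map (source : String) (out : List Bool) : Prop := out = source_code_character_map_alt source
instance (source : String) (out : List Bool) : Decidable (Spec_source_code_character_map source out) := by unfold Spec_source_code_character_map; infer_instance

-- ===== CLAIM (what is proved, stated in full; the proofs are below) =====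
def Claim_equal_source_code_character_map : Prop := ∀ (source : String), Dom_source_code_character_map source → Spec_source_code_character_map source (source_code_character_map source)

-- ===== LEMMAS AND PROOFS =====

lemma take_set_succ (m : List Bool) (j : Nat) (hj : j < m.length) :
    (m.set j false).take (j + 1) = m.take j ++ [false] := by
  have hlenj : (m.take j).length = j := by rw [List.length_take]; omega
  rw [List.set_eq_take_append_cons_drop, if_pos hj, List.take_append, hlenj]
  simp [List.take_of_length_le, hlenj]

lemma take_succ_of_true (m : List Bool) (j : Nat) (hj : j < m.length) (ht : m[j] = true) :
    m.take (j + 1) = m.take j ++ [true] := by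
  rw [List.take_add_one]
  simp [List.getElem?_eq_getElem hj, ht]

lemma key (src : List Char) : ∀ n j (m : List Bool), src.length - j ≤ n →
    m.length = src.length →
    (∀ k (hk : k < m.length), j ≤ k → m[k] = true) →
    aLoop src m j "code" n = m.take j ++ bOuter src j n ∧
    aLoop src m j "string" n = m.take j ++ bStr src j n ∧
    aLoop src m j "comment" n = m.take j ++ bCom src j n := by
  intro n
  induction n with
  | zero =>
    intro j m hn hlen _
    have hj : m.length ≤ j := by omega
    rw [aLoop, aLoop, aLoop, bOuter, bStr, bCom]
    simp [List.take_of_length_le hj]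
  | succ n ih =>
    intro j m hn hlen hinv
    rw [aLoop, aLoop, aLoop, bOuter, bStr, bCom]
    by_cases hj : j < src.length
    · have hjm : j < m.length := by omega
      have hlen1 : (m.set j false).length = src.length := by simpa using hlen
      have hinv1 : ∀ k (hk : k < (m.set j false).length), j + 1 ≤ k →
          (m.set j false)[k] = true := by
        intro k hk hk2
        rw [List.getElem_set_ne (by omega)]
        exact hinv k (by simpa using hk) (by omega)
      have ih1 := ih (j + 1) (m.set j false) (by omega) hlen1 hinv1
      have htk := take_set_succ m j hjm
      refine ⟨?_, ?_, ?_⟩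
      · simp only [hj, dite_true]
        by_cases hc : src[j] = '\''
        · simp only [hc, reduceIte]
          rw [ih1.2.1, htk]; simp
        · by_cases hc2 : src[j] = '"'
          · simp only [hc2, reduceIte]
            rw [ih1.2.2, htk]; simp
          · simp only [hc, hc2, reduceIte]
            have ih0 := ih (j + 1) m (by omega) hlen
              (fun k hk hk2 => hinv k hk (by omega))
            rw [ih0.1, take_succ_of_true m j hjm (hinv j hjm (le_refl j))]
            simp
      · simp only [hj, dite_true, reduceIte]
        by_cases hc : src[j] = '\''
        · simp only [hc, reduceIte]
          by_cases hq : j + 1 < src.length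
          · simp only [dif_pos hq]
            by_cases hc2 : src[j + 1] = '\''
            · simp only [hc2, reduceIte]
              have hjm1 : j + 1 < (m.set j false).length := by omega
              have hlen2 : ((m.set j false).set (j + 1) false).length = src.length := by
                simpa using hlen
              have hinv2 : ∀ k (hk : k < ((m.set j false).set (j + 1) false).length),
                  j + 2 ≤ k → ((m.set j false).set (j + 1) false)[k] = true := by
                intro k hk hk2
                rw [List.getElem_set_ne (by omega), List.getElem_set_ne (by omega)]
                exact hinv k (by simpa using hk) (by omega)
              have ih2 := ih (j + 2) ((m.set j false).set (j + 1) false) (by omega)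
                hlen2 hinv2
              rw [ih2.2.1, take_set_succ (m.set j false) (j + 1) hjm1, htk]
              simp
            · simp only [hc2, reduceIte]
              rw [ih1.1, htk]; simp
          · simp only [dif_neg hq]
            rw [ih1.1, htk]; simp
        · simp only [hc, reduceIte]
          rw [ih1.2.1, htk]; simp
      · simp only [hj, dite_true, reduceIte]
        by_cases hc : src[j] = '"'
        · simp only [hc, reduceIte]
          rw [ih1.1, htk]; simp
        · simp only [hc, reduceIte]
          rw [ih1.2.2, htk]; simp
    · have hjm : m.length ≤ j := by omega
      simp [hj, List.take_of_length_le hjm]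

-- ===== VERDICT (by name: the statement is the Claim_ definition above) =====
theorem source_code_character_map_spec : Claim_equal_source_code_character_map := by
  intro source _
  unfold Spec_source_code_character_map source_code_character_map source_code_character_map_alt
  have h := key source.toList (source.toList.length) 0
    (source.toList.map (fun _ => true)) (by omega) (by simp)
    (by intro k hk _; simp at hk ⊢)
  rw [h.1]; simp
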